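-- pv_equiv track=rewrite | github.com/EricCpy/AdventOfCode | 2023/Day14/solution2.py | roll_stones
-- ===== SOURCE A (Python) =====
-- def roll_stones(stones):
--     for stone_row_idx, stone_row in enumerate(stones):
--         for stone_idx, x in enumerate(stone_row):
--             if x == 'O':
--                 curr_row = stone_idx
--                 next = stones[stone_row_idx][curr_row -1]
--                 while next == '.' and curr_row - 1 >= 0:
--                     stones[stone_row_idx][curr_row - 1] = 'O'
--                     stones[stone_row_idx][curr_row] = '.'
--                     curr_row -= 1
--                     next = stones[stone_row_idx][curr_row -1]
--
--     return stones
-- ===== SOURCE B (Python) =====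
-- def roll_stones(stones):
--     # Alternative algorithm: single left-to-right pass per row, buffering pending
--     # '.' gaps and emitting each 'O' immediately; a wall flushes the buffer.
--     # (The original mutates the inner
--     # row lists in place; B replaces them via stones[i] = out -- the proved
--     # equivalence is about the return value.)
--     for i, row in enumerate(stones):
--         out = []
--         pending = 0
--         for x in row:
--             if x == '.':
--                 pending += 1
--             elif x == 'O':
--                 out.append('O')
--             else:
--                 out.extend(['.'] * pending)
--                 pending = 0
--                 out.append(x)
--         out.extend(['.'] * pending)
--         stones[i] = out
--     return stones
-- ===== Notes on version B (the rewrite author's own statement) =====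
-- stated objective: alternative
-- what changed: Replaces the per-stone while-loop bubbling with a single left-to-right pass per row that buffers pending '.' gaps and emits each 'O' immediately, flushing the buffer at every wall.
import Mathlib
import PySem

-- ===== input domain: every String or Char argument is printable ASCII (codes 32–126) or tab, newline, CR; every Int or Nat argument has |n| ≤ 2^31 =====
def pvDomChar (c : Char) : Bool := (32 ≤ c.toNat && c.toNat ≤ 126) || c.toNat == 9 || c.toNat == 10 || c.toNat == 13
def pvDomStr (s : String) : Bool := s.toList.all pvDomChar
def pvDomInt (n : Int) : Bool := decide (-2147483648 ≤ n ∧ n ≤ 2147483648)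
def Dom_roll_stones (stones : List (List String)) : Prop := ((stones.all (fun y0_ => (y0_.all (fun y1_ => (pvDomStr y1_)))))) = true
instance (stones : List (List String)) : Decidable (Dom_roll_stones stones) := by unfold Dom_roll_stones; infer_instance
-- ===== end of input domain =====

-- B replaces A's per-stone leftward bubbling (while-loop swaps) with a single
-- left-to-right pass per row buffering pending '.' gaps (an alternative algorithm).
-- A mutates the inner row lists in place (B rebuilds them); the equivalence
-- proved here is about the return value.

-- ===== PORT A =====
-- the inner `while next == '.' and curr_row - 1 >= 0:` loop, state = the row and curr_row
def rollA_while : List String → Nat → List String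
  | row, 0 => row
  | row, (curr+1) =>
    if PySem.List.pyGet? row (((curr+1 : Nat) : Int) - 1) = some "." then
      rollA_while ((row.set curr "O").set (curr+1) ".") curr
    else row

-- the `for stone_idx, x in enumerate(stone_row):` loop (reading x from the mutated row)
def rollA_row (row : List String) : List String :=
  (List.range row.length).foldl
    (fun r (stone_idx : Nat) =>
      if PySem.List.pyGet? r ((stone_idx : Nat) : Int) = some "O" then rollA_while r stone_idx else r)
    row

def roll_stones (stones : List (List String)) : List (List String) :=
  (List.range stones.length).foldl
    (fun st stone_row_idx => st.set stone_row_idx (rollA_row (st.getD stone_row_idx [])))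
    stones

-- ===== PORT B =====
def rollB_step (acc : List String × Nat) (x : String) : List String × Nat :=
  if x = "." then (acc.1, acc.2 + 1)
  else if x = "O" then (acc.1 ++ ["O"], acc.2)
  else (acc.1 ++ List.replicate acc.2 "." ++ [x], 0)

def rollB_row (row : List String) : List String :=
  let s := row.foldl rollB_step ([], 0)
  s.1 ++ List.replicate s.2 "."

def roll_stones_alt (stones : List (List String)) : List (List String) :=
  stones.map rollB_row

-- ===== PRECONDITION & SPEC =====
def Spec_roll_stones (stones : List (List String)) (out : List (List String)) : Prop := out = roll_stones_alt stones
instance (stones : List (List String)) (out : List (List String)) : Decidable (Spec_roll_stones stones out) := by unfold Spec_roll_stones; infer_instance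

-- ===== CLAIM (what is proved, stated in full; the proofs are below) =====
def Claim_equal_roll_stones : Prop := ∀ (stones : List (List String)), Dom_roll_stones stones → Spec_roll_stones stones (roll_stones stones)

-- ===== LEMMAS AND PROOFS =====

theorem set_append_len {α : Type} (P : List α) (x v : α) (T : List α) :
    (P ++ x :: T).set P.length v = P ++ v :: T := by
  induction P with
  | nil => simp
  | cons a P ih => simp [ih]

theorem getD_append_len {α : Type} (P : List α) (x : α) (T : List α) (d : α) :
    (P ++ x :: T).getD P.length d = x := by
  induction P with
  | nil => simp
  | cons a P _ => simp

theorem getElem?_append_len {α : Type} (P : List α) (x : α) (T : List α) :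
    (P ++ x :: T)[P.length]? = some x := by
  induction P with
  | nil => simp
  | cons a P _ => simp

-- the while loop slides an 'O' left across k dots onto the block M (empty or not ending in '.')
theorem while_slide (M : List String) (k : Nat) (R : List String)
    (hM : M = [] ∨ M.getLast? ≠ some ".") :
    rollA_while (M ++ List.replicate k "." ++ "O" :: R) (M.length + k)
      = M ++ "O" :: (List.replicate k "." ++ R) := by
  induction k generalizing R with
  | zero =>
    rcases hM with hM | hM
    · subst hM; simp [rollA_while]
    · rcases M.eq_nil_or_concat with h | ⟨M', y, h⟩
      · simp [rollA_while, h]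
      · rw [List.concat_eq_append] at h
        subst h
        have hy : y ≠ "." := by
          intro he; apply hM; simp [he]
        have hlen : (M' ++ [y]).length + 0 = M'.length + 1 := by simp
        rw [hlen]
        simp only [rollA_while]
        have hidx : (((M'.length + 1 : Nat) : Int) - 1) = ((M'.length : Nat) : Int) := by
          push_cast; ring
        rw [hidx, PySem.List.pyGet?_natCast]
        have hrw : M' ++ [y] ++ List.replicate 0 "." ++ "O" :: R = M' ++ y :: ("O" :: R) := by
          simp
        rw [hrw, getElem?_append_len, if_neg (by simp [hy])]
        simp
  | succ k ih =>
    have hc : M.length + (k + 1) = (M.length + k) + 1 := by omega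
    rw [hc]
    simp only [rollA_while]
    have hrow : M ++ List.replicate (k+1) "." ++ "O" :: R
        = (M ++ List.replicate k ".") ++ "." :: ("O" :: R) := by
      simp [List.replicate_succ' (n := k)]
    have hget : PySem.List.pyGet? (M ++ List.replicate (k+1) "." ++ "O" :: R)
        (((M.length + k + 1 : Nat) : Int) - 1) = some "." := by
      have h0 : (((M.length + k + 1 : Nat) : Int) - 1) = ((M.length + k : Nat) : Int) := by
        push_cast; ring
      rw [h0, PySem.List.pyGet?_natCast, hrow]
      have h1 : M.length + k = (M ++ List.replicate k ".").length := by simp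
      rw [h1, getElem?_append_len]
    rw [if_pos hget]
    have hset1 : (M ++ List.replicate (k+1) "." ++ "O" :: R).set (M.length + k) "O"
        = (M ++ List.replicate k ".") ++ "O" :: ("O" :: R) := by
      rw [hrow]
      have h1 : M.length + k = (M ++ List.replicate k ".").length := by simp
      rw [h1, set_append_len]
    have hset2 : ((M ++ List.replicate k ".") ++ "O" :: ("O" :: R)).set (M.length + k + 1) "."
        = M ++ List.replicate k "." ++ "O" :: ("." :: R) := by
      have h1 : (M ++ List.replicate k ".") ++ "O" :: ("O" :: R)
          = ((M ++ List.replicate k ".") ++ ["O"]) ++ "O" :: R := by simp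
      have h2 : M.length + k + 1 = ((M ++ List.replicate k ".") ++ ["O"]).length := by
        simp [Nat.add_assoc]
      rw [h1, h2, set_append_len]
      simp
    rw [hset1, hset2, ih ("." :: R)]
    simp [List.replicate_succ' (n := k)]

-- invariant of A's per-row index loop against B's fold state (out, pending)
theorem row_inv (suffx : List String) : ∀ (out : List String) (p : Nat),
    (out = [] ∨ out.getLast? ≠ some ".") →
    (List.range' (out.length + p) suffx.length).foldl
        (fun r (stone_idx : Nat) =>
          if PySem.List.pyGet? r ((stone_idx : Nat) : Int) = some "O" then rollA_while r stone_idx else r)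
        (out ++ List.replicate p "." ++ suffx)
      = (suffx.foldl rollB_step (out, p)).1
          ++ List.replicate (suffx.foldl rollB_step (out, p)).2 "." := by
  induction suffx with
  | nil => intro out p _; simp
  | cons x suffx ih =>
    intro out p hout
    rw [List.length_cons, List.range'_succ]
    simp only [List.foldl_cons]
    have hgx : PySem.List.pyGet? (out ++ List.replicate p "." ++ x :: suffx)
        ((out.length + p : Nat) : Int) = some x := by
      rw [PySem.List.pyGet?_natCast]
      have h1 : out ++ List.replicate p "." ++ x :: suffx
          = (out ++ List.replicate p ".") ++ x :: suffx := by simp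
      have h2 : out.length + p = (out ++ List.replicate p ".").length := by simp
      rw [h1, h2, getElem?_append_len]
    rw [hgx]
    by_cases hO : x = "O"
    · subst hO
      rw [if_pos rfl, while_slide out p suffx hout]
      have hre : out ++ "O" :: (List.replicate p "." ++ suffx)
          = (out ++ ["O"]) ++ List.replicate p "." ++ suffx := by simp
      have hlen : out.length + p + 1 = (out ++ ["O"]).length + p := by
        simp only [List.length_append, List.length_cons, List.length_nil]; omega
      rw [hre, hlen, ih (out ++ ["O"]) p (by right; simp)]
      simp [rollB_step]
    · rw [if_neg (by simp [hO])]
      by_cases hD : x = "."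
      · subst hD
        have hre : out ++ List.replicate p "." ++ "." :: suffx
            = out ++ List.replicate (p+1) "." ++ suffx := by
          simp [List.replicate_succ' (n := p)]
        have hlen : out.length + p + 1 = out.length + (p+1) := by omega
        rw [hre, hlen, ih out (p+1) hout]
        simp [rollB_step]
      · have hre : out ++ List.replicate p "." ++ x :: suffx
            = (out ++ List.replicate p "." ++ [x]) ++ List.replicate 0 "." ++ suffx := by simp
        have hlen : out.length + p + 1 = (out ++ List.replicate p "." ++ [x]).length + 0 := by
          simp [Nat.add_assoc]
        rw [hre, hlen, ih (out ++ List.replicate p "." ++ [x]) 0 (by right; simp [hD])]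
        simp only [rollB_step, if_neg hD, if_neg hO]

theorem rowA_eq_rowB (row : List String) : rollA_row row = rollB_row row := by
  have h := row_inv row [] 0 (Or.inl rfl)
  simpa [rollA_row, rollB_row, List.range_eq_range'] using h

theorem foldl_set_map (f : List String → List String) :
    ∀ (xs done : List (List String)),
    (List.range' done.length xs.length).foldl
        (fun st i => st.set i (f (st.getD i []))) (done ++ xs)
      = done ++ xs.map f := by
  intro xs
  induction xs with
  | nil => intro done; simp
  | cons x xs ih =>
    intro done
    rw [List.length_cons, List.range'_succ]
    simp only [List.foldl_cons]
    rw [getD_append_len, set_append_len]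
    have h1 : done ++ f x :: xs = (done ++ [f x]) ++ xs := by simp
    have h2 : done.length + 1 = (done ++ [f x]).length := by simp
    rw [h1, h2, ih (done ++ [f x])]
    simp

-- ===== VERDICT (by name: the statement is the Claim_ definition above) =====
theorem roll_stones_spec : Claim_equal_roll_stones := by
  intro stones _
  unfold Spec_roll_stones roll_stones roll_stones_alt
  have h := foldl_set_map rollA_row stones []
  simp only [List.nil_append, List.length_nil, ← List.range_eq_range'] at h
  rw [h]
  exact List.map_congr_left (fun row _ => rowA_eq_rowB row)
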